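-- pv_equiv track=rewrite | github.com/NovoMinersClub/novo-electrumx | electrumx/lib/coins/coin_novo.py | total_supply
-- ===== SOURCE A (Python) =====
-- def total_supply(height):
--     # The total supply calculation for Novo
--     subsidy = 50 * 10**8
--     halvings = height // 210000
--
--     if halvings >= 64:
--         return 0
--
--     for _ in range(halvings):
--         subsidy //= 2
--
--     return subsidy
-- ===== SOURCE B (Python) =====
-- def total_supply(height):
--     # Closed-form Novo subsidy: delegate the range tests to an early-return chain,
--     # then shift the base subsidy right by the number of completed halving eras.
--     eras = height // 210000
--     if eras >= 64:
--         return 0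
--     if eras <= 0:
--         return 5_000_000_000
--     return 5_000_000_000 >> eras
-- ===== Notes on version B (the rewrite author's own statement) =====
-- stated objective: simpler
-- what changed: Replaced the per-halving floor-division loop with an early-return chain ending in one closed-form right shift of the hard-coded base subsidy.
import Mathlib
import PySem

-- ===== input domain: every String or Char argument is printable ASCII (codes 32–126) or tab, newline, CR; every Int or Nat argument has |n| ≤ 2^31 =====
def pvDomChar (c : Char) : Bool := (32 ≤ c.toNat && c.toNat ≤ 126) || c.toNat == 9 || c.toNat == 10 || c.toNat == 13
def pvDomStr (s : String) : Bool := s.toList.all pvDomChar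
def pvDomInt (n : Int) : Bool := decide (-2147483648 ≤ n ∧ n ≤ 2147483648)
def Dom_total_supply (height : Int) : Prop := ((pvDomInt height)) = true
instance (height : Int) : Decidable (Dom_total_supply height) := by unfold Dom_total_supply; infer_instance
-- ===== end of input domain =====

-- B replaces A's halvings-long halving loop with an early-return chain and one closed-form right shift (simpler).

-- ===== PORT A =====
def total_supply (height : Int) : Int :=
  let subsidy : Int := 50 * 10 ^ 8
  let halvings : Int := PySem.Int.floordiv height 210000
  if halvings ≥ 64 then 0
  else (PySem.List.pyRange 0 halvings 1).foldl (fun s _ => PySem.Int.floordiv s 2) subsidy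

-- ===== PORT B =====
def total_supply_alt (height : Int) : Int :=
  let eras : Int := PySem.Int.floordiv height 210000
  if eras ≥ 64 then 0
  else if eras ≤ 0 then 5000000000
  else 5000000000 >>> eras.toNat

-- ===== PRECONDITION & SPEC =====
def Spec_total_supply (height : Int) (out : Int) : Prop := out = total_supply_alt height
instance (height : Int) (out : Int) : Decidable (Spec_total_supply height out) := by unfold Spec_total_supply; infer_instance

-- ===== CLAIM (what is proved, stated in full; the proofs are below) =====
def Claim_equal_total_supply : Prop := ∀ (height : Int), Dom_total_supply height → Spec_total_supply height (total_supply height)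

-- ===== LEMMAS AND PROOFS =====
theorem floordiv_two_eq_shift (s : Int) : PySem.Int.floordiv s 2 = s >>> (1:Nat) := by
  rw [Int.shiftRight_eq_div_pow]
  simp [PySem.Int.floordiv, Int.fdiv_eq_ediv]

theorem shift_shift_one (s : Int) (n : Nat) : (s >>> n) >>> (1:Nat) = s >>> (n+1) := by
  simp only [Int.shiftRight_eq_div_pow, pow_succ]
  exact Int.ediv_ediv_of_nonneg (by positivity)

theorem pyRange_nonpos (b : Int) (hb : b ≤ 0) : PySem.List.pyRange 0 b 1 = [] := by
  simp [PySem.List.pyRange]; omega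

theorem loop_eq_shift (n : Nat) (s : Int) :
    (PySem.List.pyRange 0 (n:Int) 1).foldl (fun acc _ => PySem.Int.floordiv acc 2) s = s >>> n := by
  induction n with
  | zero => simp
  | succ k ih =>
      rw [show ((k+1 : Nat) : Int) = (k : Int) + 1 by push_cast; ring,
          PySem.List.pyRange_one_succ_right (by positivity)]
      simp only [List.foldl_append, List.foldl_cons, List.foldl_nil]
      rw [ih, floordiv_two_eq_shift, shift_shift_one]

-- ===== VERDICT (by name: the statement is the Claim_ definition above) =====
theorem total_supply_spec : Claim_equal_total_supply := by
  intro height _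
  unfold Spec_total_supply total_supply total_supply_alt
  simp only []
  set h := PySem.Int.floordiv height 210000 with hh
  by_cases h64 : h ≥ 64
  · simp [h64]
  · simp only [if_neg h64]
    by_cases hle : h ≤ 0
    · rw [pyRange_nonpos h hle]
      simp [hle]
    · have hpos : 0 ≤ h := by omega
      have key := loop_eq_shift h.toNat (50 * 10 ^ 8)
      rw [Int.toNat_of_nonneg hpos] at key
      rw [key]
      simp [hle]
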